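-- pv_equiv track=rewrite | github.com/SergeyKulagin/algoritms | leetcode-problems/regexMatch2.py | build_regex
-- ===== SOURCE A (Python) =====
-- def build_regex(p):
--     regex = []
--     p_len = len(p)
--     i = 0
--     while i < p_len:
--         if i + 1 < p_len and p[i + 1] == '*':
--             assert p[i] != '*'
--             regex.append((p[i], '*'))
--             i += 2
--         else:
--             assert p[i] != '*'
--             regex.append((p[i], '1'))
--             i += 1
--     return regex
-- ===== SOURCE B (Python) =====
-- import re
--
-- def build_regex(p):
--     regex = []
--     consumed = 0
--     for m in re.finditer(r'([^*])(\*?)', p):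
--         regex.append((m.group(1), '*' if m.group(2) else '1'))
--         consumed += len(m.group(0))
--     assert consumed == len(p)
--     return regex
-- ===== Notes on version B (the rewrite author's own statement) =====
-- stated objective: idiomatic
-- what changed: Replaces A's manual while-loop over an index with a re.finditer regex tokenizer that walks ([^*])(\*?) matches and checks total consumed length for the assert.
-- outside the precondition, e.g. on build_regex('*'): A raises AssertionError, B raises AssertionError
import Mathlib
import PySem

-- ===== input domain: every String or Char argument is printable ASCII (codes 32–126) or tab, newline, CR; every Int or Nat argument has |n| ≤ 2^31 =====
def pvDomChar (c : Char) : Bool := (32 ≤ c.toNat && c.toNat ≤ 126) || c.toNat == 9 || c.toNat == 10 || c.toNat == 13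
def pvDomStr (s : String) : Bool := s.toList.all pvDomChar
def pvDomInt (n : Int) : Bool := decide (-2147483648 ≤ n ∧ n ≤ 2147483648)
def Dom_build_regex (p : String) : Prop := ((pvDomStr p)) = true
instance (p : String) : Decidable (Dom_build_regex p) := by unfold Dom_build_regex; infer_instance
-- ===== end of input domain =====

-- B tokenizes with re.finditer instead of A's manual index loop (idiomatic; same cost).
-- Both programs raise AssertionError on patterns with a stray '*'; Pre_ excludes exactly those.

-- ===== PORT A =====
-- A's while loop over index i; p[i] via l[i]?; the 'i + 1 < p_len and p[i+1] == "*"'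
-- test is exactly 'l[(i+1)]? = some '*''. Where A's assert fails (p[i] = '*', outside
-- Pre_) the port returns the list built so far.
def build_regex_go (l : List Char) (i : Nat) (acc : List (String × String)) :
    List (String × String) :=
  match h : l[i]? with
  | none => acc
  | some c =>
    if l[(i+1)]? = some '*' then
      if c = '*' then acc
      else build_regex_go l (i+2) (acc ++ [(String.ofList [c], "*")])
    else
      if c = '*' then acc
      else build_regex_go l (i+1) (acc ++ [(String.ofList [c], "1")])
termination_by l.length - i
decreasing_by
  all_goals
    have hi : i < l.length := by
      by_contra hc
      simp [List.getElem?_eq_none (by omega : l.length ≤ i)] at h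
    omega

def build_regex (p : String) : List (String × String) :=
  build_regex_go p.toList 0 []

-- ===== PORT B =====
-- finditer of r'([^*])(\*?)': at each position a non-'*' char matches, optionally
-- consuming a following '*'; a '*' in char position does not match and the scan skips
-- one char without consuming it.  Returns (tokens, total consumed length).
def alt_scan : List Char → (List (String × String)) × Nat
  | [] => ([], 0)
  | '*' :: rest => alt_scan rest
  | c :: '*' :: rest2 =>
    let r := alt_scan rest2
    ((String.ofList [c], "*") :: r.1, r.2 + 2)
  | c :: rest =>
    let r := alt_scan rest
    ((String.ofList [c], "1") :: r.1, r.2 + 1)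

-- 'assert consumed == len(p)'; on failure (outside Pre_) the port returns [].
def build_regex_alt (p : String) : List (String × String) :=
  let r := alt_scan p.toList
  if r.2 = p.toList.length then r.1 else []

-- ===== PRECONDITION & SPEC =====
-- Pre_ excludes exactly the inputs on which A raises AssertionError (a '*' with no
-- preceding literal char: first char '*' or two consecutive '*'); B raises there too.
def Pre_build_regex (p : String) : Prop :=
  p.toList.head? ≠ some '*' ∧ p.toList.IsChain (fun a b => a ≠ '*' ∨ b ≠ '*')
instance (p : String) : Decidable (Pre_build_regex p) := by
  unfold Pre_build_regex; infer_instance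

def pvWitness_build_regex : String := "ab*c*d"

def Spec_build_regex (p : String) (out : List (String × String)) : Prop :=
  out = build_regex_alt p
instance (p : String) (out : List (String × String)) : Decidable (Spec_build_regex p out) := by
  unfold Spec_build_regex; infer_instance

-- ===== CLAIM (what is proved, stated in full; the proofs are below) =====
def Claim_equal_build_regex : Prop :=
  ∀ (p : String), Dom_build_regex p → Pre_build_regex p → Spec_build_regex p (build_regex p)

-- ===== LEMMAS AND PROOFS =====

-- the tokenizable shape, on char lists
def Ok (s : List Char) : Prop :=
  s.head? ≠ some '*' ∧ s.IsChain (fun a b => a ≠ '*' ∨ b ≠ '*')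

lemma ok_star (c : Char) (r : List Char) (h : Ok (c :: '*' :: r)) :
    c ≠ '*' ∧ Ok r := by
  obtain ⟨h1, h2⟩ := h
  rw [List.isChain_cons_cons] at h2
  obtain ⟨hcs, h2⟩ := h2
  refine ⟨by simpa using hcs, ?_, h2.of_cons⟩
  cases r with
  | nil => simp
  | cons d r' =>
    rw [List.isChain_cons_cons] at h2
    simpa using h2.1

lemma ok_one (c : Char) (r : List Char) (h : Ok (c :: r)) (hr : r.head? ≠ some '*') :
    c ≠ '*' ∧ Ok r := by
  obtain ⟨h1, h2⟩ := h
  exact ⟨by simpa using h1, hr, h2.of_cons⟩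

-- under Ok, the finditer scan consumes everything
lemma alt_scan_len : ∀ (n : Nat) (s : List Char), s.length ≤ n → Ok s →
    (alt_scan s).2 = s.length := by
  intro n
  induction n with
  | zero =>
    intro s hs _
    have : s = [] := List.eq_nil_of_length_eq_zero (by omega)
    subst this; simp [alt_scan]
  | succ n ih =>
    intro s hs hok
    cases s with
    | nil => simp [alt_scan]
    | cons c rest =>
      have hc : c ≠ '*' := by simpa using hok.1
      cases rest with
      | nil => simp [alt_scan]
      | cons d rest2 =>
        by_cases hd : d = '*'
        · subst hd
          obtain ⟨_, hok2⟩ := ok_star c rest2 hok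
          have := ih rest2 (by simp at hs ⊢; omega) hok2
          simp [alt_scan, this]
        · obtain ⟨_, hok2⟩ := ok_one c (d :: rest2) hok (by simpa using hd)
          have := ih (d :: rest2) (by simp at hs ⊢; omega) hok2
          simp [alt_scan, hd, this]

-- index arithmetic: the suffix seen by A's loop
lemma drop_head (l : List Char) (i : Nat) (c : Char) (s : List Char)
    (h : l.drop i = c :: s) : l[i]? = some c ∧ l.drop (i+1) = s := by
  constructor
  · have h0 : (l.drop i)[0]? = l[i+0]? := List.getElem?_drop
    rw [h] at h0; simpa using h0.symm
  · have h1 : (l.drop i).drop 1 = l.drop (i+1) := by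
      rw [List.drop_drop]
    rw [← h1, h]; simp

lemma getElem?_none_of_drop_nil (l : List Char) (i : Nat) (h : l.drop i = []) :
    l[i]? = none :=
  List.getElem?_eq_none (List.drop_eq_nil_iff.mp h)

-- A's index loop produces exactly the tokens of B's scan on the remaining suffix
lemma go_drop : ∀ (n : Nat) (s : List Char), s.length ≤ n → Ok s →
    ∀ (l : List Char) (i : Nat) (acc : List (String × String)), l.drop i = s →
    build_regex_go l i acc = acc ++ (alt_scan s).1 := by
  intro n
  induction n with
  | zero =>
    intro s hs _ l i acc hdrop
    have : s = [] := List.eq_nil_of_length_eq_zero (by omega)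
    subst this
    rw [build_regex_go]
    split
    · simp [alt_scan]
    · rename_i c hsome
      rw [getElem?_none_of_drop_nil l i hdrop] at hsome; cases hsome
  | succ n ih =>
    intro s hs hok l i acc hdrop
    cases s with
    | nil =>
      rw [build_regex_go]
      split
      · simp [alt_scan]
      · rename_i c hsome
        rw [getElem?_none_of_drop_nil l i hdrop] at hsome; cases hsome
    | cons c rest =>
      obtain ⟨hgi, hdrop1⟩ := drop_head l i c rest hdrop
      have hc : c ≠ '*' := by simpa using hok.1
      cases rest with
      | nil =>
        have hgi1 : l[(i+1)]? = none := getElem?_none_of_drop_nil l (i+1) hdrop1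
        have hrec := ih [] (by simp) ⟨by simp, List.isChain_nil⟩ l (i+1)
          (acc ++ [(String.ofList [c], "1")]) hdrop1
        rw [build_regex_go]
        split
        · rename_i hnone; rw [hgi] at hnone; cases hnone
        · rename_i c' hsome; rw [hgi] at hsome
          obtain rfl : c' = c := by injection hsome with h; exact h.symm
          simp only [hgi1]
          simp [hc, hrec, alt_scan]
      | cons d rest2 =>
        obtain ⟨hgi1, hdrop2⟩ := drop_head l (i+1) d rest2 hdrop1
        by_cases hd : d = '*'
        · subst hd
          obtain ⟨_, hok2⟩ := ok_star c rest2 hok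
          have hdrop2' : l.drop (i+2) = rest2 := by
            have h12 : i + 1 + 1 = i + 2 := by omega
            rw [← h12]; exact hdrop2
          have hrec := ih rest2 (by simp at hs ⊢; omega) hok2 l (i+2)
            (acc ++ [(String.ofList [c], "*")]) hdrop2'
          rw [build_regex_go]
          split
          · rename_i hnone; rw [hgi] at hnone; cases hnone
          · rename_i c' hsome; rw [hgi] at hsome
            obtain rfl : c' = c := by injection hsome with h; exact h.symm
            simp only [hgi1, if_neg hc, hrec]
            simp [alt_scan]
        · obtain ⟨_, hok1⟩ := ok_one c (d :: rest2) hok (by simpa using hd)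
          have hrec := ih (d :: rest2) (by simp at hs ⊢; omega) hok1 l (i+1)
            (acc ++ [(String.ofList [c], "1")]) hdrop1
          rw [build_regex_go]
          split
          · rename_i hnone; rw [hgi] at hnone; cases hnone
          · rename_i c' hsome; rw [hgi] at hsome
            obtain rfl : c' = c := by injection hsome with h; exact h.symm
            simp only [hgi1]
            have hne' : (some d : Option Char) ≠ some '*' := by simpa using hd
            rw [if_neg hne', if_neg hc, hrec]
            simp [alt_scan, hd]

-- ===== VERDICT (by name: the statement is the Claim_ definition above) =====
theorem build_regex_spec : Claim_equal_build_regex := by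
  intro p _ hpre
  unfold Spec_build_regex build_regex build_regex_alt
  have hok : Ok p.toList := hpre
  have h1 := go_drop p.toList.length p.toList le_rfl hok p.toList 0 [] (by simp)
  have h2 := alt_scan_len p.toList.length p.toList le_rfl hok
  simp [h1, h2]
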